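-- pv_equiv track=rewrite | github.com/barathksd/2048-Bot-Using-Reinforcement-Learning | logic2048.py | check
-- ===== SOURCE A (Python) =====
-- def check(a):
--     #checks the available action for a given state
--     l = {'up':set(),'down':set(),'right':set(),'left':set()}
--     for j in [0,1,2,3]:
--         i=3
--         while i>0:
--
--             if a[i][j]!=0 and (a[i][j]==a[i-1][j] or a[i-1][j]==0):
--                 l['up'].add(j)
--             if a[j][i]!=0 and (a[j][i]==a[j][i-1] or a[j][i-1]==0):
--                 l['left'].add(j)
--             if a[3-i][j]!=0 and (a[3-i][j]==a[4-i][j] or a[4-i][j]==0):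
--                 l['down'].add(j)
--             if a[j][3-i]!=0 and (a[j][3-i]==a[j][4-i] or a[j][4-i]==0):
--                 l['right'].add(j)
--             i = i - 1
--     return l
-- ===== SOURCE B (Python) =====
-- def check(a):
--     # checks the available action for a given state:
--     # a move is available iff actually performing the slide changes the line
--     def merge(ts):
--         if len(ts) >= 2 and ts[0] == ts[1]:
--             return [2 * ts[0]] + merge(ts[2:])
--         if ts:
--             return [ts[0]] + merge(ts[1:])
--         return []
--
--     def slide(line):
--         out = merge([x for x in line if x != 0])
--         return out + [0] * (len(line) - len(out))
--
--     moves = {'up': set(), 'down': set(), 'right': set(), 'left': set()}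
--     for j in range(4):
--         col = [a[i][j] for i in range(4)]
--         row = [a[j][i] for i in range(4)]
--         if slide(col) != col:
--             moves['up'].add(j)
--         if slide(col[::-1]) != col[::-1]:
--             moves['down'].add(j)
--         if slide(row[::-1]) != row[::-1]:
--             moves['right'].add(j)
--         if slide(row) != row:
--             moves['left'].add(j)
--     return moves
-- ===== Notes on version B (the rewrite author's own statement) =====
-- stated objective: alternative
-- what changed: Instead of scanning adjacent index pairs for a merge-or-gap pattern, B actually simulates the 2048 slide of each oriented line (filter out zeros, recursively merge equal adjacent pairs, pad with zeros) and reports a direction available iff the slid line differs from the original; equivalence rests on the proved lemma that the slide changes a line iff some tile has an equal neighbour or a zero before it.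
import Mathlib
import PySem

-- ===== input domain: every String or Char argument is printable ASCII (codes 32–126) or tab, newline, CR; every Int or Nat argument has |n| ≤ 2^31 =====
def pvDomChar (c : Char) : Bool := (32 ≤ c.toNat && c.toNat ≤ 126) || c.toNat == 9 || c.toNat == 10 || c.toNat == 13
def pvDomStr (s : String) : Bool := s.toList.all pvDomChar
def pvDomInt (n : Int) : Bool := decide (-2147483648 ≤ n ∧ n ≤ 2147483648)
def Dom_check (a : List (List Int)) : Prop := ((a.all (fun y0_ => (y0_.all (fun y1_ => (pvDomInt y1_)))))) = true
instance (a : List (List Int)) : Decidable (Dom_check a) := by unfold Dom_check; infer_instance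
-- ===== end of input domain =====

-- B replaces A's adjacent-pair scan by actually simulating the 2048 slide (compress nonzeros,
-- merge equal adjacent pairs) and declaring a move available iff the slide changes the line;
-- objective: alternative (same O(1) cost on a fixed 4x4 board).


-- shared totalized indexing helper: a[i][j] (exact under Pre_check, where all indices read are in range)
def pyAt (a : List (List Int)) (i j : Int) : Int :=
  PySem.List.pyGetD (PySem.List.pyGetD a i []) j 0

-- ===== PORT A =====
-- l = {'up':…}; for j in [0,1,2,3]: i=3; while i>0: four conditional set-adds; i -= 1
def check (a : List (List Int)) : List (String × List Int) :=
  let st := ([0, 1, 2, 3] : List Int).foldl (fun st j =>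
    ([3, 2, 1] : List Int).foldl (fun st i =>
      (if pyAt a i j ≠ 0 ∧ (pyAt a i j = pyAt a (i-1) j ∨ pyAt a (i-1) j = 0)
       then PySem.Set.add st.1 j else st.1,
       if pyAt a j i ≠ 0 ∧ (pyAt a j i = pyAt a j (i-1) ∨ pyAt a j (i-1) = 0)
       then PySem.Set.add st.2.1 j else st.2.1,
       if pyAt a (3-i) j ≠ 0 ∧ (pyAt a (3-i) j = pyAt a (4-i) j ∨ pyAt a (4-i) j = 0)
       then PySem.Set.add st.2.2.1 j else st.2.2.1,
       if pyAt a j (3-i) ≠ 0 ∧ (pyAt a j (3-i) = pyAt a j (4-i) ∨ pyAt a j (4-i) = 0)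
       then PySem.Set.add st.2.2.2 j else st.2.2.2)) st)
    ((PySem.Set.empty, PySem.Set.empty, PySem.Set.empty, PySem.Set.empty) :
      PySem.Set Int × PySem.Set Int × PySem.Set Int × PySem.Set Int)
  [("up", st.1), ("down", st.2.2.1), ("right", st.2.2.2), ("left", st.2.1)]

-- ===== PORT B =====
-- def merge(ts): recursive left-to-right merge of equal adjacent pairs
def mergeT : List Int → List Int
  | a :: b :: t => if a = b then (2 * a) :: mergeT t else a :: mergeT (b :: t)
  | [a] => [a]
  | [] => []

-- def slide(line): out = merge(nonzeros); pad with zeros to the original length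
def slideLine (line : List Int) : List Int :=
  let out := mergeT (line.filter (fun x => decide (x ≠ 0)))
  out ++ List.replicate (line.length - out.length) 0

def lineOf (a : List (List Int)) (vert : Bool) (j : Int) : List Int :=
  (PySem.List.pyRange 0 4 1).map (fun i => if vert then pyAt a i j else pyAt a j i)

def check_alt (a : List (List Int)) : List (String × List Int) :=
  let st := (PySem.List.pyRange 0 4 1).foldl (fun st j =>
    let col := lineOf a true j
    let row := lineOf a false j
    (if slideLine col ≠ col then PySem.Set.add st.1 j else st.1,
     if slideLine col.reverse ≠ col.reverse then PySem.Set.add st.2.1 j else st.2.1,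
     if slideLine row.reverse ≠ row.reverse then PySem.Set.add st.2.2.1 j else st.2.2.1,
     if slideLine row ≠ row then PySem.Set.add st.2.2.2 j else st.2.2.2))
    ((PySem.Set.empty, PySem.Set.empty, PySem.Set.empty, PySem.Set.empty) :
      PySem.Set Int × PySem.Set Int × PySem.Set Int × PySem.Set Int)
  [("up", st.1), ("down", st.2.1), ("right", st.2.2.1), ("left", st.2.2.2)]

-- ===== PRECONDITION & SPEC =====
-- Pre_check: exactly where Python A returns (IndexError otherwise): at least 4 rows,
-- each of the first 4 rows with at least 4 entries (rows/columns beyond index 3 are never read).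
def Pre_check (a : List (List Int)) : Prop :=
  4 ≤ a.length ∧ ∀ r ∈ a.take 4, 4 ≤ r.length
instance (a : List (List Int)) : Decidable (Pre_check a) := by unfold Pre_check; infer_instance

def pvWitness_check : List (List Int) :=
  [[0, 2, 2, 0], [4, 0, 0, 2], [0, 0, 8, 8], [2, 4, 2, 4]]

def Spec_check (a : List (List Int)) (out : List (String × List Int)) : Prop := out = check_alt a
instance (a : List (List Int)) (out : List (String × List Int)) : Decidable (Spec_check a out) := by unfold Spec_check; infer_instance

-- ===== CLAIM (what is proved, stated in full; the proofs are below) =====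
def Claim_equal_check : Prop := ∀ (a : List (List Int)), Dom_check a → Pre_check a → Spec_check a (check a)

-- ===== LEMMAS AND PROOFS =====

-- the merged per-column conditions of A's inner while loop (i = 3, 2, 1)
def PupA (a : List (List Int)) (j : Int) : Bool := decide (
  (pyAt a 3 j ≠ 0 ∧ (pyAt a 3 j = pyAt a 2 j ∨ pyAt a 2 j = 0)) ∨
  (pyAt a 2 j ≠ 0 ∧ (pyAt a 2 j = pyAt a 1 j ∨ pyAt a 1 j = 0)) ∨
  (pyAt a 1 j ≠ 0 ∧ (pyAt a 1 j = pyAt a 0 j ∨ pyAt a 0 j = 0)))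
def PleftA (a : List (List Int)) (j : Int) : Bool := decide (
  (pyAt a j 3 ≠ 0 ∧ (pyAt a j 3 = pyAt a j 2 ∨ pyAt a j 2 = 0)) ∨
  (pyAt a j 2 ≠ 0 ∧ (pyAt a j 2 = pyAt a j 1 ∨ pyAt a j 1 = 0)) ∨
  (pyAt a j 1 ≠ 0 ∧ (pyAt a j 1 = pyAt a j 0 ∨ pyAt a j 0 = 0)))
def PdownA (a : List (List Int)) (j : Int) : Bool := decide (
  (pyAt a 0 j ≠ 0 ∧ (pyAt a 0 j = pyAt a 1 j ∨ pyAt a 1 j = 0)) ∨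
  (pyAt a 1 j ≠ 0 ∧ (pyAt a 1 j = pyAt a 2 j ∨ pyAt a 2 j = 0)) ∨
  (pyAt a 2 j ≠ 0 ∧ (pyAt a 2 j = pyAt a 3 j ∨ pyAt a 3 j = 0)))
def PrightA (a : List (List Int)) (j : Int) : Bool := decide (
  (pyAt a j 0 ≠ 0 ∧ (pyAt a j 0 = pyAt a j 1 ∨ pyAt a j 1 = 0)) ∨
  (pyAt a j 1 ≠ 0 ∧ (pyAt a j 1 = pyAt a j 2 ∨ pyAt a j 2 = 0)) ∨
  (pyAt a j 2 ≠ 0 ∧ (pyAt a j 2 = pyAt a j 3 ∨ pyAt a j 3 = 0)))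

theorem ite_bool_of_iff {α : Type} {p : Prop} [Decidable p] {b : Bool}
    (h : p ↔ b = true) (x y : α) : (if p then x else y) = (if b then x else y) := by
  by_cases hp : p
  · rw [if_pos hp, if_pos (h.mp hp)]
  · rw [if_neg hp, if_neg (fun hb => hp (h.mpr hb))]

theorem addIf_chain (s : PySem.Set Int) (j : Int) (p q r : Prop)
    [Decidable p] [Decidable q] [Decidable r] :
    (if r then PySem.Set.add (if q then PySem.Set.add (if p then PySem.Set.add s j else s) j
                              else (if p then PySem.Set.add s j else s)) j
     else (if q then PySem.Set.add (if p then PySem.Set.add s j else s) j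
           else (if p then PySem.Set.add s j else s)))
      = if p ∨ q ∨ r then PySem.Set.add s j else s := by
  by_cases hp : p <;> by_cases hq : q <;> by_cases hr : r <;> simp [hp, hq, hr]

-- A's inner while loop, merged to one conditional add per direction
theorem inner_merge (a : List (List Int)) (j : Int)
    (st : PySem.Set Int × PySem.Set Int × PySem.Set Int × PySem.Set Int) :
    ([3, 2, 1] : List Int).foldl (fun st i =>
      (if pyAt a i j ≠ 0 ∧ (pyAt a i j = pyAt a (i-1) j ∨ pyAt a (i-1) j = 0)
       then PySem.Set.add st.1 j else st.1,
       if pyAt a j i ≠ 0 ∧ (pyAt a j i = pyAt a j (i-1) ∨ pyAt a j (i-1) = 0)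
       then PySem.Set.add st.2.1 j else st.2.1,
       if pyAt a (3-i) j ≠ 0 ∧ (pyAt a (3-i) j = pyAt a (4-i) j ∨ pyAt a (4-i) j = 0)
       then PySem.Set.add st.2.2.1 j else st.2.2.1,
       if pyAt a j (3-i) ≠ 0 ∧ (pyAt a j (3-i) = pyAt a j (4-i) ∨ pyAt a j (4-i) = 0)
       then PySem.Set.add st.2.2.2 j else st.2.2.2)) st
    = (if PupA a j then PySem.Set.add st.1 j else st.1,
       if PleftA a j then PySem.Set.add st.2.1 j else st.2.1,
       if PdownA a j then PySem.Set.add st.2.2.1 j else st.2.2.1,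
       if PrightA a j then PySem.Set.add st.2.2.2 j else st.2.2.2) := by
  obtain ⟨u, l, d, r⟩ := st
  simp only [List.foldl,
    show (3:Int)-3 = 0 from rfl, show (4:Int)-3 = 1 from rfl, show (3:Int)-2 = 1 from rfl,
    show (4:Int)-2 = 2 from rfl, show (3:Int)-1 = 2 from rfl, show (4:Int)-1 = 3 from rfl,
    show (2:Int)-1 = 1 from rfl, show (1:Int)-1 = 0 from rfl]
  refine Prod.ext ?_ (Prod.ext ?_ (Prod.ext ?_ ?_)) <;>
    exact (addIf_chain ..).trans (ite_bool_of_iff (by simp [PupA, PleftA, PdownA, PrightA]) _ _)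

-- a fold of componentwise updates splits into four folds
theorem tuple_fold_if (l : List Int) (p1 p2 p3 p4 : Int → Prop)
    [DecidablePred p1] [DecidablePred p2] [DecidablePred p3] [DecidablePred p4]
    (st : PySem.Set Int × PySem.Set Int × PySem.Set Int × PySem.Set Int) :
    l.foldl (fun st j =>
      (if p1 j then PySem.Set.add st.1 j else st.1,
       if p2 j then PySem.Set.add st.2.1 j else st.2.1,
       if p3 j then PySem.Set.add st.2.2.1 j else st.2.2.1,
       if p4 j then PySem.Set.add st.2.2.2 j else st.2.2.2)) st
    = (l.foldl (fun s j => if p1 j then PySem.Set.add s j else s) st.1,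
       l.foldl (fun s j => if p2 j then PySem.Set.add s j else s) st.2.1,
       l.foldl (fun s j => if p3 j then PySem.Set.add s j else s) st.2.2.1,
       l.foldl (fun s j => if p4 j then PySem.Set.add s j else s) st.2.2.2) := by
  induction l generalizing st with
  | nil => rfl
  | cons x xs ih => exact ih _

theorem fold_congr_if (l : List Int) (b c : Int → Prop)
    [DecidablePred b] [DecidablePred c]
    (h : ∀ j, b j ↔ c j) (s : PySem.Set Int) :
    l.foldl (fun s j => if b j then PySem.Set.add s j else s) s
    = l.foldl (fun s j => if c j then PySem.Set.add s j else s) s := by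
  have hf : (fun (s : PySem.Set Int) j => if b j then PySem.Set.add s j else s)
          = (fun s j => if c j then PySem.Set.add s j else s) := by
    funext s j; exact if_congr (h j) rfl rfl
  rw [hf]

-- the heart of the equivalence: the slide changes a 4-line iff some tile can merge or fall into a gap
theorem slide_ne_iff (x0 x1 x2 x3 : Int) :
    (slideLine [x0, x1, x2, x3] ≠ [x0, x1, x2, x3]) ↔
      ((x1 ≠ 0 ∧ (x1 = x0 ∨ x0 = 0)) ∨ (x2 ≠ 0 ∧ (x2 = x1 ∨ x1 = 0)) ∨
       (x3 ≠ 0 ∧ (x3 = x2 ∨ x2 = 0))) := by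
  by_cases h0 : x0 = 0 <;> by_cases h1 : x1 = 0 <;> by_cases h2 : x2 = 0 <;> by_cases h3 : x3 = 0 <;>
    simp_all [slideLine, mergeT] <;> split_ifs <;> simp_all <;> omega

theorem lineOf_true (a : List (List Int)) (j : Int) :
    lineOf a true j = [pyAt a 0 j, pyAt a 1 j, pyAt a 2 j, pyAt a 3 j] := by
  simp [lineOf, show PySem.List.pyRange 0 4 1 = [0, 1, 2, 3] from by decide]

theorem lineOf_false (a : List (List Int)) (j : Int) :
    lineOf a false j = [pyAt a j 0, pyAt a j 1, pyAt a j 2, pyAt a j 3] := by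
  simp [lineOf, show PySem.List.pyRange 0 4 1 = [0, 1, 2, 3] from by decide]

theorem up_iff (a : List (List Int)) (j : Int) :
    (PupA a j = true) ↔ (slideLine (lineOf a true j) ≠ lineOf a true j) := by
  rw [lineOf_true, slide_ne_iff, PupA, decide_eq_true_iff]; tauto
theorem left_iff (a : List (List Int)) (j : Int) :
    (PleftA a j = true) ↔ (slideLine (lineOf a false j) ≠ lineOf a false j) := by
  rw [lineOf_false, slide_ne_iff, PleftA, decide_eq_true_iff]; tauto
theorem down_iff (a : List (List Int)) (j : Int) :
    (PdownA a j = true) ↔ (slideLine (lineOf a true j).reverse ≠ (lineOf a true j).reverse) := by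
  rw [lineOf_true, show ∀ x0 x1 x2 x3 : Int, List.reverse [x0,x1,x2,x3] = [x3,x2,x1,x0] from
    fun _ _ _ _ => rfl, slide_ne_iff, PdownA, decide_eq_true_iff]; tauto
theorem right_iff (a : List (List Int)) (j : Int) :
    (PrightA a j = true) ↔ (slideLine (lineOf a false j).reverse ≠ (lineOf a false j).reverse) := by
  rw [lineOf_false, show ∀ x0 x1 x2 x3 : Int, List.reverse [x0,x1,x2,x3] = [x3,x2,x1,x0] from
    fun _ _ _ _ => rfl, slide_ne_iff, PrightA, decide_eq_true_iff]; tauto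

-- ===== VERDICT (by name: the statement is the Claim_ definition above) =====
theorem check_spec : Claim_equal_check := by
  intro a _ _
  unfold Spec_check check check_alt
  simp only [inner_merge, tuple_fold_if,
    show PySem.List.pyRange 0 4 1 = [0, 1, 2, 3] from by decide]
  rw [fold_congr_if _ _ _ (up_iff a), fold_congr_if _ _ _ (left_iff a),
      fold_congr_if _ _ _ (down_iff a), fold_congr_if _ _ _ (right_iff a)]
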